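-- pv_equiv track=rewrite | github.com/missing-semicolon/advent-of-code-2018 | day02_inventory_management.py | count_diff
-- ===== SOURCE A (Python) =====
-- def count_diff(box1, box2):
--     count_diff = 0
--     samesies = list()
--     for char1, char2 in zip(box1, box2):
--         if char1 != char2:
--             count_diff += 1
--         else:
--             samesies.append(char1)
--
--         if count_diff > 1:
--             return
--     if count_diff == 1:
--         return ''.join(samesies)
-- ===== SOURCE B (Python) =====
-- def count_diff(box1, box2):
--     n = min(len(box1), len(box2))
--     a, b = box1[:n], box2[:n]
--     p = 0
--     while p < n and a[p] == b[p]: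
--         p += 1
--     if p == n:
--         return None
--     if a[p + 1:] == b[p + 1:]:
--         return a[:p] + a[p + 1:]
--     return None
-- ===== Notes on version B (the rewrite author's own statement) =====
-- stated objective: alternative
-- what changed: Instead of counting mismatches while accumulating matching chars into a list and joining, B locates the first mismatch as a common-prefix length p, decides by one whole-suffix equality comparison, and rebuilds the answer by slicing out position p.
import Mathlib
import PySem

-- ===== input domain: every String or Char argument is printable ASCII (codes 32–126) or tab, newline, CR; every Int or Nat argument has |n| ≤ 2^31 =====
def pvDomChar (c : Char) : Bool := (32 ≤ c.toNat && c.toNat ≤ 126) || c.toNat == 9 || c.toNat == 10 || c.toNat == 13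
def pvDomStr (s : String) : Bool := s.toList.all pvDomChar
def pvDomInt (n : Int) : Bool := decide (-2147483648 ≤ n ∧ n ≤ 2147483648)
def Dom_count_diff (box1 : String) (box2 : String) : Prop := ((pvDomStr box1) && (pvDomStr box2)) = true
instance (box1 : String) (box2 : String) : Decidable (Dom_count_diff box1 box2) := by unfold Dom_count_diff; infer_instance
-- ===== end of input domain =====

-- B replaces A's mismatch counter + accumulated list of matching chars by a common-prefix
-- scan plus one suffix equality check, rebuilding the result by slicing; alternative, same cost.


-- ===== PORT A =====
-- loop over zip(box1, box2) with the mismatch counter and the accumulated matching chars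
-- (accumulator is consed, ''.join reverses it back)
def countDiffLoop : List (Char × Char) → Nat → List Char → Option String
  | [], cnt, sames => if cnt = 1 then some (String.mk sames.reverse) else none
  | (c1, c2) :: rest, cnt, sames =>
      let cnt' := if c1 ≠ c2 then cnt + 1 else cnt
      let sames' := if c1 ≠ c2 then sames else c1 :: sames
      if cnt' > 1 then none else countDiffLoop rest cnt' sames'

def count_diff (box1 : String) (box2 : String) : Option String :=
  countDiffLoop (box1.toList.zip box2.toList) 0 []

-- ===== PORT B =====
-- the 'while p < n and a[p] == b[p]' scan: common-prefix length of two equal-length lists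
def cpLen : List Char → List Char → Nat
  | c1 :: r1, c2 :: r2 => if c1 = c2 then cpLen r1 r2 + 1 else 0
  | _, _ => 0

-- slices a[:n], a[p+1:], a[:p] on in-range nonnegative bounds are take/drop (exact here)
def count_diff_alt (box1 : String) (box2 : String) : Option String :=
  let n := min box1.toList.length box2.toList.length
  let a := box1.toList.take n
  let b := box2.toList.take n
  let p := cpLen a b
  if p = n then none
  else if a.drop (p + 1) = b.drop (p + 1) then
    some (String.mk (a.take p ++ a.drop (p + 1)))
  else none

-- ===== PRECONDITION & SPEC =====
def Spec_count_diff (box1 : String) (box2 : String) (out : Option String) : Prop := out = count_diff_alt box1 box2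
instance (box1 : String) (box2 : String) (out : Option String) : Decidable (Spec_count_diff box1 box2 out) := by unfold Spec_count_diff; infer_instance

-- ===== CLAIM (what is proved, stated in full; the proofs are below) =====
def Claim_equal_count_diff : Prop := ∀ (box1 : String) (box2 : String), Dom_count_diff box1 box2 → Spec_count_diff box1 box2 (count_diff box1 box2)

-- ===== LEMMAS AND PROOFS =====

-- all pairs of the zipped list match
def pairsEq (l : List (Char × Char)) : Bool := l.all (fun p => p.1 = p.2)

-- common-prefix length measured on the zipped list
def cpLenP : List (Char × Char) → Nat
  | p :: rest => if p.1 = p.2 then cpLenP rest + 1 else 0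
  | [] => 0

theorem cpLenP_le (l : List (Char × Char)) : cpLenP l ≤ l.length := by
  induction l with
  | nil => simp [cpLenP]
  | cons p rest ih =>
    simp only [cpLenP, List.length_cons]
    split <;> omega

-- A's loop started with count 1: some iff all remaining pairs match
theorem countDiffLoop_one (l : List (Char × Char)) (sames : List Char) :
    countDiffLoop l 1 sames =
      if pairsEq l then some (String.mk (sames.reverse ++ l.map Prod.fst)) else none := by
  induction l generalizing sames with
  | nil => simp [countDiffLoop, pairsEq]
  | cons p rest ih =>
    obtain ⟨c1, c2⟩ := p
    by_cases h : c1 = c2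
    · subst h
      rw [show countDiffLoop ((c1, c1) :: rest) 1 sames = countDiffLoop rest 1 (c1 :: sames) by
        simp [countDiffLoop], ih,
        show pairsEq ((c1, c1) :: rest) = pairsEq rest by simp [pairsEq]]
      by_cases hp : pairsEq rest = true
      · rw [if_pos hp, if_pos hp]; simp
      · rw [if_neg hp, if_neg hp]
    · simp [countDiffLoop, pairsEq, h, List.all_cons]

-- A's loop started with count 0, characterized by the common-prefix length
theorem countDiffLoop_zero (l : List (Char × Char)) (sames : List Char) :
    countDiffLoop l 0 sames =
      if cpLenP l = l.length then none
      else if pairsEq (l.drop (cpLenP l + 1)) then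
        some (String.mk (sames.reverse ++ ((l.take (cpLenP l)).map Prod.fst ++ (l.drop (cpLenP l + 1)).map Prod.fst)))
      else none := by
  induction l generalizing sames with
  | nil => simp [countDiffLoop, cpLenP]
  | cons p rest ih =>
    obtain ⟨c1, c2⟩ := p
    by_cases h : c1 = c2
    · subst h
      have hle := cpLenP_le rest
      rw [show countDiffLoop ((c1, c1) :: rest) 0 sames = countDiffLoop rest 0 (c1 :: sames) by
        simp [countDiffLoop], ih,
        show cpLenP ((c1, c1) :: rest) = cpLenP rest + 1 by simp [cpLenP]]
      simp only [List.length_cons, List.take_succ_cons, List.drop_succ_cons,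
        List.map_cons, List.reverse_cons, List.append_assoc, List.cons_append]
      by_cases hc : cpLenP rest = rest.length
      · rw [if_pos hc, if_pos (by omega)]
      · rw [if_neg hc, if_neg (show ¬ (cpLenP rest + 1 = rest.length + 1) by omega)]
        by_cases hp : pairsEq (List.drop (cpLenP rest + 1) rest) = true
        · rw [if_pos hp, if_pos hp]; simp
        · rw [if_neg hp, if_neg hp]
    · simp [countDiffLoop, h, cpLenP, countDiffLoop_one, pairsEq]

-- the truncated first string is the zip's first projections
theorem take_min_eq_map_fst (l1 l2 : List Char) :
    l1.take (min l1.length l2.length) = (l1.zip l2).map Prod.fst := by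
  induction l1 generalizing l2 with
  | nil => simp
  | cons c r ih =>
    cases l2 with
    | nil => simp
    | cons d s =>
      simp only [List.length_cons, Nat.succ_min_succ, List.take_succ_cons, List.zip_cons_cons,
        List.map_cons, List.cons.injEq, true_and]
      exact ih s

theorem take_min_eq_map_snd (l1 l2 : List Char) :
    l2.take (min l1.length l2.length) = (l1.zip l2).map Prod.snd := by
  induction l1 generalizing l2 with
  | nil => simp
  | cons c r ih =>
    cases l2 with
    | nil => simp
    | cons d s =>
      simp only [List.length_cons, Nat.succ_min_succ, List.take_succ_cons, List.zip_cons_cons,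
        List.map_cons, List.cons.injEq, true_and]
      exact ih s

theorem cpLen_eq_cpLenP (l : List (Char × Char)) :
    cpLen (l.map Prod.fst) (l.map Prod.snd) = cpLenP l := by
  induction l with
  | nil => rfl
  | cons p rest ih => simp [cpLen, cpLenP, ih]

theorem map_eq_iff_pairsEq (l : List (Char × Char)) :
    l.map Prod.fst = l.map Prod.snd ↔ pairsEq l = true := by
  induction l with
  | nil => simp [pairsEq]
  | cons p rest ih =>
    obtain ⟨c1, c2⟩ := p
    simp only [pairsEq, List.all_cons, Bool.and_eq_true, decide_eq_true_eq] at ih ⊢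
    simp only [List.map_cons, List.cons.injEq, ih]

-- ===== VERDICT (by name: the statement is the Claim_ definition above) =====
theorem count_diff_spec : Claim_equal_count_diff := by
  intro box1 box2 _
  unfold Spec_count_diff count_diff count_diff_alt
  set L := box1.toList.zip box2.toList with hL
  have h1 : box1.toList.take (min box1.toList.length box2.toList.length) = L.map Prod.fst :=
    take_min_eq_map_fst _ _
  have h2 : box2.toList.take (min box1.toList.length box2.toList.length) = L.map Prod.snd :=
    take_min_eq_map_snd _ _
  have hlen : min box1.toList.length box2.toList.length = L.length := (List.length_zip ..).symm
  simp only [h1, h2]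
  simp only [cpLen_eq_cpLenP, ← List.map_drop, ← List.map_take]
  simp only [hlen]
  rw [countDiffLoop_zero]
  simp only [List.reverse_nil, List.nil_append]
  by_cases hc : cpLenP L = L.length
  · rw [if_pos hc, if_pos hc]
  · rw [if_neg hc, if_neg hc]
    by_cases hp : pairsEq (L.drop (cpLenP L + 1)) = true
    · rw [if_pos hp, if_pos ((map_eq_iff_pairsEq _).mpr hp)]
    · rw [if_neg hp, if_neg (fun h => hp ((map_eq_iff_pairsEq _).mp h))]
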